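-- pv_equiv track=rewrite | github.com/CatPawnD20/testAndAnalysys | testScripts/testMaker.py | genaratetaken_profit_list
-- ===== SOURCE A (Python) =====
-- def genaratetaken_profit_list(gradual_take_profit_list, trade, trade_profit):
--     trade_taken_profit = trade_profit
--     taken_profit_list = []
--     for gradual_take_profit in gradual_take_profit_list:
--         trade_taken_profit = trade_taken_profit - gradual_take_profit
--         if trade_taken_profit >= 0:
--             taken_profit_list.append(gradual_take_profit)
--         else:
--             return taken_profit_list
--     return taken_profit_list
-- ===== SOURCE B (Python) =====
-- def genaratetaken_profit_list(gradual_take_profit_list, trade, trade_profit):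
--     # Phase 1: sequential running totals after each subtraction.
--     totals = []
--     running = trade_profit
--     for g in gradual_take_profit_list:
--         running = running - g
--         totals.append(running)
--     # Phase 2: index of the first strictly negative total; slice the prefix.
--     k = next((i for i, t in enumerate(totals) if t < 0), len(totals))
--     return gradual_take_profit_list[:k]
-- ===== Notes on version B (the rewrite author's own statement) =====
-- stated objective: alternative
-- what changed: B replaces A's single loop with early return and an output accumulator by a two-phase decomposition: first materialise the list of sequential running totals, then locate the first strictly negative total and return a slice of the input up to that index.
import Mathlib
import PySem

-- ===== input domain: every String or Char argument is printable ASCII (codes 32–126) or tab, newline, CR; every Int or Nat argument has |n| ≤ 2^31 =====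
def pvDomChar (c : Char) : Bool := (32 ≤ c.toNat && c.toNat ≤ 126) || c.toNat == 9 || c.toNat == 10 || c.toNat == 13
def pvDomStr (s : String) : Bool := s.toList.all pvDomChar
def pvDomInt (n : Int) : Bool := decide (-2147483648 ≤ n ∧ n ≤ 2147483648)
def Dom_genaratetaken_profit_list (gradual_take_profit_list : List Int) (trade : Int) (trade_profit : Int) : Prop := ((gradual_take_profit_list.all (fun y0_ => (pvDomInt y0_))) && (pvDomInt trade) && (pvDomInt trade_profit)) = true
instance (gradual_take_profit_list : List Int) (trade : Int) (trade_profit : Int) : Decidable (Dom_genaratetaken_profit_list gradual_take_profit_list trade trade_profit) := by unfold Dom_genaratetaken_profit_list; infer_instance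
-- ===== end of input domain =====

-- B re-decomposes A's early-return loop into two phases (running-totals scan, then find-first-negative and slice); same value, same cost ("alternative").

-- ===== PORT A =====
-- the for-loop of A: state = (trade_taken_profit, taken_profit_list); early return → stop with acc
def genA_go (l : List Int) (t : Int) (acc : List Int) : List Int :=
  match l with
  | [] => acc
  | g :: rest =>
    let t' := t - g
    if t' ≥ 0 then genA_go rest t' (acc ++ [g]) else acc

def genaratetaken_profit_list (gradual_take_profit_list : List Int) (trade : Int) (trade_profit : Int) : List Int :=
  genA_go gradual_take_profit_list trade_profit []

-- ===== PORT B =====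
-- phase 1 of Source B: the list of sequential running totals
def genB_totals (l : List Int) (running : Int) : List Int :=
  match l with
  | [] => []
  | g :: rest => (running - g) :: genB_totals rest (running - g)

def genaratetaken_profit_list_alt (gradual_take_profit_list : List Int) (trade : Int) (trade_profit : Int) : List Int :=
  let totals := genB_totals gradual_take_profit_list trade_profit
  -- phase 2 of Source B: first index with a strictly negative total, default len(totals)
  let k := (totals.findIdx? (fun t => t < 0)).getD totals.length
  gradual_take_profit_list.take k

-- ===== PRECONDITION & SPEC =====
def Spec_genaratetaken_profit_list (gradual_take_profit_list : List Int) (trade : Int) (trade_profit : Int) (out : List Int) : Prop := out = genaratetaken_profit_list_alt gradual_take_profit_list trade trade_profit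
instance (gradual_take_profit_list : List Int) (trade : Int) (trade_profit : Int) (out : List Int) : Decidable (Spec_genaratetaken_profit_list gradual_take_profit_list trade trade_profit out) := by unfold Spec_genaratetaken_profit_list; infer_instance

-- ===== CLAIM (what is proved, stated in full; the proofs are below) =====
def Claim_equal_genaratetaken_profit_list : Prop := ∀ (gradual_take_profit_list : List Int) (trade : Int) (trade_profit : Int), Dom_genaratetaken_profit_list gradual_take_profit_list trade trade_profit → Spec_genaratetaken_profit_list gradual_take_profit_list trade trade_profit (genaratetaken_profit_list gradual_take_profit_list trade trade_profit)

-- ===== LEMMAS AND PROOFS =====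

lemma genA_go_eq_alt (l : List Int) (t : Int) (acc : List Int) :
    genA_go l t acc =
      acc ++ l.take (((genB_totals l t).findIdx? (fun x => x < 0)).getD (genB_totals l t).length) := by
  induction l generalizing t acc with
  | nil => simp [genA_go, genB_totals]
  | cons g rest ih =>
    simp only [genA_go, genB_totals]
    by_cases h : t - g ≥ 0
    · have hneg : ¬ (t - g < 0) := by omega
      rw [if_pos h, ih]
      simp [List.findIdx?_cons, hneg, List.take_succ_cons]
    · have hneg : (t - g < 0) := by omega
      rw [if_neg h]
      simp [List.findIdx?_cons, hneg]

-- ===== VERDICT (by name: the statement is the Claim_ definition above) =====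
theorem genaratetaken_profit_list_spec : Claim_equal_genaratetaken_profit_list := by
  intro l trade tp _
  unfold Spec_genaratetaken_profit_list genaratetaken_profit_list genaratetaken_profit_list_alt
  simpa using genA_go_eq_alt l tp []
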